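-- pv_equiv track=rewrite | github.com/smearle/script-doctor | sweep_rl.py | _expand_sweep_updates
-- ===== SOURCE A (Python) =====
-- from itertools import product
-- from typing import Any, Dict, List, Sequence, Tuple
--
-- def _expand_sweep_updates(sweep_axes: Dict[str, List[Any]]) -> List[Dict[str, Any]]:
--     if not sweep_axes:
--         return [{}]
--     if any(len(v) == 0 for v in sweep_axes.values()):
--         return []
--     axis_names = list(sweep_axes.keys())
--     axis_values = [sweep_axes[name] for name in axis_names]
--     return [
--         {name: value for name, value in zip(axis_names, combo)}
--         for combo in product(*axis_values)
--     ]
-- ===== SOURCE B (Python) =====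
-- def _expand_sweep_updates(sweep_axes):
--     result = [{}]
--     for name, values in sweep_axes.items():
--         result = [{**partial, name: v} for partial in result for v in values]
--     return result
-- ===== Notes on version B (the rewrite author's own statement) =====
-- stated objective: simpler
-- what changed: Replaces itertools.product over pre-collected key/value lists (plus two explicit guards for the empty-dict and empty-axis cases) with a single accumulator loop that extends partial dicts one axis at a time; the guards become redundant because the fold handles those cases on its own.
import Mathlib
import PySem

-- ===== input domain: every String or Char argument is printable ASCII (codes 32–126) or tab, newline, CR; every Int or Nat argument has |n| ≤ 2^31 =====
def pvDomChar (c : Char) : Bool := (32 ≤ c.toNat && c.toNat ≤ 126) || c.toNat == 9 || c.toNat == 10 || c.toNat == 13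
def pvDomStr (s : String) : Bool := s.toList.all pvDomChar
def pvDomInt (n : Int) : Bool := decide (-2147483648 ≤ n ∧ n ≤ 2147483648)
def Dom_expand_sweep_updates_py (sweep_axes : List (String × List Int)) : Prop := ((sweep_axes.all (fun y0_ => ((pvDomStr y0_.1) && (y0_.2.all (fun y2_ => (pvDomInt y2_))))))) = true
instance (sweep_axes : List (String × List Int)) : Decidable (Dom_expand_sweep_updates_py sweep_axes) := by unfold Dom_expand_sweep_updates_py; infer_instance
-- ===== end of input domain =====

-- B replaces itertools.product plus two explicit guards by a single accumulator fold
-- that extends partial dicts one axis at a time (simpler; the guards become redundant).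

-- ===== PORT A =====
-- itertools.product(*axis_values), ported as the standard recursive Cartesian product
-- (first list varies slowest, exactly product's order).
def pvProduct : List (List Int) → List (List Int)
  | [] => [[]]
  | vs :: rest => vs.flatMap (fun v => (pvProduct rest).map (fun c => v :: c))

-- sweep_axes[name]: first-match lookup in the association list (the dict convention).
-- The [] default is unreachable in A: every looked-up name comes from the dict's own keys.
def pvDictGetD (d : List (String × List Int)) (k : String) : List Int :=
  match d.find? (fun p => p.1 == k) with
  | some p => p.2
  | none => []

def expand_sweep_updates_py (sweep_axes : List (String × List Int)) : List (List (String × Int)) :=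
  if sweep_axes = [] then [[]]
  else if sweep_axes.any (fun kv => kv.2.length = 0) then []
  else
    let axis_names := sweep_axes.map (fun kv => kv.1)
    let axis_values := axis_names.map (fun name => pvDictGetD sweep_axes name)
    (pvProduct axis_values).map (fun combo => axis_names.zip combo)

-- ===== PORT B =====
def expand_sweep_updates_py_alt (sweep_axes : List (String × List Int)) : List (List (String × Int)) :=
  sweep_axes.foldl
    (fun result nv => result.flatMap (fun part => nv.2.map (fun v => part ++ [(nv.1, v)])))
    [[]]

-- ===== PRECONDITION & SPEC =====
-- Pre_ excludes association lists with duplicate axis names: a Python dict cannot hold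
-- duplicate keys, so such lists correspond to no actual input of A.
def Pre_expand_sweep_updates_py (sweep_axes : List (String × List Int)) : Prop :=
  (sweep_axes.map (fun kv => kv.1)).Nodup
instance (sweep_axes : List (String × List Int)) : Decidable (Pre_expand_sweep_updates_py sweep_axes) := by unfold Pre_expand_sweep_updates_py; infer_instance

def pvWitness_expand_sweep_updates_py : (List (String × List Int)) := [("a", [1, 2]), ("b", [3])]

def Spec_expand_sweep_updates_py (sweep_axes : List (String × List Int)) (out : List (List (String × Int))) : Prop := out = expand_sweep_updates_py_alt sweep_axes
instance (sweep_axes : List (String × List Int)) (out : List (List (String × Int))) : Decidable (Spec_expand_sweep_updates_py sweep_axes out) := by unfold Spec_expand_sweep_updates_py; infer_instance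

-- ===== CLAIM (what is proved, stated in full; the proofs are below) =====
def Claim_equal_expand_sweep_updates_py : Prop := ∀ (sweep_axes : List (String × List Int)), Dom_expand_sweep_updates_py sweep_axes → Pre_expand_sweep_updates_py sweep_axes → Spec_expand_sweep_updates_py sweep_axes (expand_sweep_updates_py sweep_axes)

-- ===== LEMMAS AND PROOFS =====

-- The canonical recursive expansion both programs compute.
def pvExpand : List (String × List Int) → List (List (String × Int))
  | [] => [[]]
  | (n, vs) :: rest => vs.flatMap (fun v => (pvExpand rest).map (fun c => (n, v) :: c))

-- B's fold, generalized over the accumulator.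
theorem alt_foldl_eq (axes : List (String × List Int)) (acc : List (List (String × Int))) :
    axes.foldl
      (fun result nv => result.flatMap (fun part => nv.2.map (fun v => part ++ [(nv.1, v)])))
      acc
    = acc.flatMap (fun p => (pvExpand axes).map (fun c => p ++ c)) := by
  induction axes generalizing acc with
  | nil => simp [pvExpand]
  | cons a rest ih =>
    obtain ⟨n, vs⟩ := a
    simp only [List.foldl_cons, ih, pvExpand]
    simp [List.flatMap_assoc, List.flatMap_map, List.map_flatMap, List.map_map, Function.comp_def]

theorem alt_eq_expand (axes : List (String × List Int)) :
    expand_sweep_updates_py_alt axes = pvExpand axes := by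
  unfold expand_sweep_updates_py_alt
  rw [alt_foldl_eq]
  simp

-- A's product-then-zip equals the canonical expansion.
theorem product_zip_eq_expand (axes : List (String × List Int)) :
    (pvProduct (axes.map (fun kv => kv.2))).map
      (fun combo => (axes.map (fun kv => kv.1)).zip combo) = pvExpand axes := by
  induction axes with
  | nil => simp [pvProduct, pvExpand]
  | cons a rest ih =>
    obtain ⟨n, vs⟩ := a
    simp only [List.map_cons, pvProduct, pvExpand, List.map_flatMap, List.map_map]
    rw [← ih]
    simp [List.map_map, Function.comp_def]

-- With distinct keys, looking each key up again returns the pair's own value list.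
theorem map_getD_eq_map_snd (axes : List (String × List Int))
    (h : (axes.map (fun kv => kv.1)).Nodup) :
    (axes.map (fun kv => kv.1)).map (fun name => pvDictGetD axes name)
      = axes.map (fun kv => kv.2) := by
  have key : ∀ p ∈ axes, pvDictGetD axes p.1 = p.2 := by
    intro p hp
    induction axes with
    | nil => cases hp
    | cons a rest ih =>
      simp only [List.map_cons, List.nodup_cons] at h
      rcases List.mem_cons.mp hp with h1 | h2
      · subst h1; simp [pvDictGetD]
      · have hne : a.1 ≠ p.1 := by
          intro he
          exact h.1 (he ▸ List.mem_map_of_mem h2)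
        have := ih h.2 h2
        simpa [pvDictGetD, List.find?_cons, hne] using this
  rw [List.map_map]
  exact List.map_congr_left (fun p hp => key p hp)

-- An empty axis empties the canonical expansion (matches A's second guard).
theorem expand_eq_nil_of_empty (axes : List (String × List Int))
    (h : axes.any (fun kv => kv.2.length = 0)) :
    pvExpand axes = [] := by
  induction axes with
  | nil => simp at h
  | cons a rest ih =>
    obtain ⟨n, vs⟩ := a
    simp only [List.any_cons, Bool.or_eq_true, decide_eq_true_eq] at h
    rcases h with h1 | h2
    · have : vs = [] := List.length_eq_zero_iff.mp h1
      simp [pvExpand, this]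
    · simp [pvExpand, ih h2]

-- ===== VERDICT (by name: the statement is the Claim_ definition above) =====
theorem expand_sweep_updates_py_spec : Claim_equal_expand_sweep_updates_py := by
  intro sweep_axes _ hpre
  unfold Spec_expand_sweep_updates_py expand_sweep_updates_py
  rw [alt_eq_expand]
  split
  · rename_i h; subst h; rfl
  · split
    · rename_i h
      rw [expand_eq_nil_of_empty sweep_axes h]
    · simp only
      rw [map_getD_eq_map_snd sweep_axes hpre, product_zip_eq_expand]
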